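-- pv_equiv track=rewrite | github.com/Finean/Pico-CO2-Monitor | main.py | conv_scroll
-- ===== SOURCE A (Python) =====
-- def conv_scroll(x, page_sizes = (6, 9, 1)):
--     x += 1
--     for y, p_size in enumerate(page_sizes):
--         if x <= p_size:
--             return y
--         else:
--             x = x - p_size
--     return(len(page_sizes) - 1)
-- ===== SOURCE B (Python) =====
-- def conv_scroll(x, page_sizes=(6, 9, 1)):
--     # Reverse traversal: page i is the answer iff the suffix sum after i is
--     # <= total - (x+1) (same as cum[i] >= x+1); overwriting while walking
--     # right-to-left keeps the leftmost such page; default is the last page.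
--     target = sum(page_sizes) - (x + 1)
--     ans = len(page_sizes) - 1
--     s = 0
--     for i in range(len(page_sizes) - 1, -1, -1):
--         if s <= target:
--             ans = i
--         s += page_sizes[i]
--     return ans
-- ===== Notes on version B (the rewrite author's own statement) =====
-- stated objective: alternative
-- what changed: B walks the pages right-to-left with a running suffix sum against the fixed threshold sum(page_sizes)-(x+1), overwriting an answer accumulator so the leftmost hit wins, with no early return and no mutation of x, instead of A's forward scan that repeatedly subtracts each page size from x and returns early.
import Mathlib
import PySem

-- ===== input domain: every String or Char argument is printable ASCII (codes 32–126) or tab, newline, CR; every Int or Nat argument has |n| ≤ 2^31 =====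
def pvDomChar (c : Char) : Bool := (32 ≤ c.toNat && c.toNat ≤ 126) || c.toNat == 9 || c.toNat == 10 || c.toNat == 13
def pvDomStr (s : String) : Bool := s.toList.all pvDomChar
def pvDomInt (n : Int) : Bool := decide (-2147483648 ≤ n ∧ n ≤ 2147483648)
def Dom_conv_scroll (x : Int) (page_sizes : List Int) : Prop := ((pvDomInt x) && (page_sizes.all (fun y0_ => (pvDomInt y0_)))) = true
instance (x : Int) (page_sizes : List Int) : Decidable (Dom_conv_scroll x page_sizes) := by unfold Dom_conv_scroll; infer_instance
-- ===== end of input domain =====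

-- B replaces A's forward subtract-and-early-return scan with a right-to-left
-- walk carrying a suffix sum against a fixed threshold and an overwritten
-- answer accumulator (alternative decomposition, same cost).


-- ===== PORT A =====
-- A's loop: enumerate(page_sizes), keep subtracting p_size from x, return y at the
-- first x ≤ p_size; fall through to len(page_sizes) - 1.
def convScrollGo (x : Int) (ps : List Int) (y : Int) (n : Int) : Int :=
  match ps with
  | [] => n - 1
  | p :: rest => if x ≤ p then y else convScrollGo (x - p) rest (y + 1) n

def conv_scroll (x : Int) (page_sizes : List Int) : Int :=
  convScrollGo (x + 1) page_sizes 0 (page_sizes.length : Int)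

-- ===== PORT B =====
-- Source B's 'for i in range(n-1, -1, -1)' loop: recursion that does its work AFTER the
-- recursive call, i.e. right-to-left over the list starting at index i; returns the
-- pair (ans, s) of the loop's two mutable variables.
def convAltGo (target n : Int) (ps : List Int) (i : Int) : Int × Int :=
  match ps with
  | [] => (n - 1, 0)
  | p :: rest =>
    let (ans, s) := convAltGo target n rest (i + 1)
    ((if s ≤ target then i else ans), s + p)

def conv_scroll_alt (x : Int) (page_sizes : List Int) : Int :=
  (convAltGo (page_sizes.sum - (x + 1)) (page_sizes.length : Int) page_sizes 0).1

-- ===== PRECONDITION & SPEC =====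
def Spec_conv_scroll (x : Int) (page_sizes : List Int) (out : Int) : Prop := out = conv_scroll_alt x page_sizes
instance (x : Int) (page_sizes : List Int) (out : Int) : Decidable (Spec_conv_scroll x page_sizes out) := by unfold Spec_conv_scroll; infer_instance

-- ===== CLAIM (what is proved, stated in full; the proofs are below) =====
def Claim_equal_conv_scroll : Prop := ∀ (x : Int) (page_sizes : List Int), Dom_conv_scroll x page_sizes → Spec_conv_scroll x page_sizes (conv_scroll x page_sizes)

-- ===== LEMMAS AND PROOFS =====
-- The loop's running sum comes back as the sum of the processed suffix.
lemma convAltGo_snd (target n : Int) (ps : List Int) (i : Int) :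
    (convAltGo target n ps i).2 = ps.sum := by
  induction ps generalizing i with
  | nil => simp [convAltGo]
  | cons p rest ih => simp [convAltGo, ih, add_comm]

-- Invariant: A's forward scan with remaining offset t equals B's right-to-left
-- pass over the same suffix with threshold ps.sum - t.
lemma convScroll_go_eq (ps : List Int) (t i n : Int) :
    convScrollGo t ps i n = (convAltGo (ps.sum - t) n ps i).1 := by
  induction ps generalizing t i with
  | nil => simp [convScrollGo, convAltGo]
  | cons p rest ih =>
    simp only [convScrollGo, convAltGo, List.sum_cons]
    rw [convAltGo_snd]
    by_cases h : t ≤ p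
    · rw [if_pos h, if_pos (by omega)]
    · rw [if_neg h, if_neg (by omega)]
      have : p + rest.sum - t = rest.sum - (t - p) := by ring
      rw [ih (t - p) (i + 1), this]

-- ===== VERDICT (by name: the statement is the Claim_ definition above) =====
theorem conv_scroll_spec : Claim_equal_conv_scroll := by
  intro x page_sizes _
  show conv_scroll x page_sizes = conv_scroll_alt x page_sizes
  unfold conv_scroll conv_scroll_alt
  exact convScroll_go_eq page_sizes (x + 1) 0 (page_sizes.length : Int)
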